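-- pv_equiv track=rewrite | github.com/DanilSuits/chessKata-python | chesskata/core.py | fixed_pieces
-- ===== SOURCE A (Python) =====
-- def fixed_pieces(index):
--     if index < 641:
--         empty_squares = list(range(8))
--
--         hints = []
--         for p in [4, 4, 20, 3]:
--             hints = hints + [ index % p ]
--             index = index // p
--
--         first_bishop_hint = hints[0]
--         second_bishop_hint = hints[1]
--
--         positions = [2 * first_bishop_hint, 2 * second_bishop_hint + 1]
--
--         for p in positions:
--             empty_squares.remove(p)
--
--         # http://bridge.thomasoandrews.com/impossible/algorithm.html
--         import itertools
--         rkr = list(itertools.combinations(range(6),3))[hints[2]]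
--
--         for p in rkr:
--             positions = positions + [empty_squares[p]]
--
--         empty_squares.remove(positions[2])
--         empty_squares.remove(positions[3])
--         empty_squares.remove(positions[4])
--
--
--         positions = positions + [empty_squares[hints[3]]]
--         empty_squares.remove(positions[5])
--
--         positions = positions + empty_squares
--
--         pieceNames = "BBRKRQNN"
--
--         crntRow = ""
--         for p in range(8):
--             crntPiece = positions.index(p)
--             crntRow = crntRow + pieceNames[ crntPiece ]
--
--         return crntRow
--
--     else:
--         return fixed_pieces(0)
-- ===== SOURCE B (Python) =====
-- def _binom(n, k):
--     if k < 0 or k > n: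
--         return 0
--     r = 1
--     for i in range(k):
--         r = r * (n - i) // (i + 1)
--     return r
--
--
-- def _kth_comb(n, r, k):
--     # k-th r-combination of range(n) in lexicographic order, by arithmetic unranking
--     res = []
--     for x in range(n):
--         if r == 0:
--             break
--         c = _binom(n - x - 1, r - 1)
--         if k < c:
--             res.append(x)
--             r -= 1
--         else:
--             k -= c
--     return res
--
--
-- def fixed_pieces(index):
--     if index < 641:
--         hints = []
--         for p in (4, 4, 20, 3):
--             hints.append(index % p)
--             index = index // p
--
--         board = [''] * 8
--         board[2 * hints[0]] = 'B'
--         board[2 * hints[1] + 1] = 'B'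
--
--         empties = [s for s in range(8) if not board[s]]
--         rkr = _kth_comb(6, 3, hints[2])
--         for pos, name in zip(rkr, 'RKR'):
--             board[empties[pos]] = name
--
--         empties = [s for s in range(8) if not board[s]]
--         board[empties[hints[3]]] = 'Q'
--
--         for s in range(8):
--             if not board[s]:
--                 board[s] = 'N'
--
--         return ''.join(board)
--     else:
--         return fixed_pieces(0)
-- ===== Notes on version B (the rewrite author's own statement) =====
-- stated objective: simpler
-- what changed: B places pieces directly into a fixed-size board list (bishops by arithmetic, R/K/R via an arithmetically unranked combination instead of enumerating all itertools.combinations, Q at the hint-th empty slot, N in the rest) and joins the board, eliminating A's positions list, its repeated list.remove calls and the final positions.index inverse pass per square.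
import Mathlib
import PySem

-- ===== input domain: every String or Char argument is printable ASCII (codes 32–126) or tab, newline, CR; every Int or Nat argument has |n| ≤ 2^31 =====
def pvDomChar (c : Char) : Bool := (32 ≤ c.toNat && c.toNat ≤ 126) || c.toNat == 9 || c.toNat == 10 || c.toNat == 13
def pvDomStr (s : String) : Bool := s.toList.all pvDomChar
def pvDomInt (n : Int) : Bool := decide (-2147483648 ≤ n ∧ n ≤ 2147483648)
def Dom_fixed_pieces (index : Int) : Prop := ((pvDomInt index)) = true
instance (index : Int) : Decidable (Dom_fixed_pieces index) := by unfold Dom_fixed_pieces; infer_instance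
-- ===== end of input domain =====

-- B replaces A's positions list, itertools enumeration and final positions.index inverse pass
-- by direct placement into an 8-slot board (objective: simpler). Strings are handled as
-- List Char per the PySem convention; every `.getD` below covers an index/element that is
-- provably always present (the Python never raises there).

-- ===== PORT A =====
-- body of A's `index < 641` branch, parameterized by the four decoded hints
-- (A reads them back out of the `hints` list it built; the values are the same)
def fixed_piecesBodyA (h0 h1 h2 h3 : Int) : String :=
  let empty_squares := PySem.List.pyRange 0 8 1
  let positions : List Int := [2 * h0, 2 * h1 + 1]
  let empty_squares := positions.foldl (fun es p => (PySem.List.remove? es p).getD es) empty_squares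
  let rkr := PySem.List.pyGetD (PySem.List.combinations (PySem.List.pyRange 0 6 1) 3) h2 []
  let positions := rkr.foldl (fun ps p => ps ++ [PySem.List.pyGetD empty_squares p 0]) positions
  let empty_squares := (PySem.List.remove? empty_squares (PySem.List.pyGetD positions 2 0)).getD empty_squares
  let empty_squares := (PySem.List.remove? empty_squares (PySem.List.pyGetD positions 3 0)).getD empty_squares
  let empty_squares := (PySem.List.remove? empty_squares (PySem.List.pyGetD positions 4 0)).getD empty_squares
  let positions := positions ++ [PySem.List.pyGetD empty_squares h3 0]
  let empty_squares := (PySem.List.remove? empty_squares (PySem.List.pyGetD positions 5 0)).getD empty_squares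
  let positions := positions ++ empty_squares
  let pieceNames : List Char := ['B', 'B', 'R', 'K', 'R', 'Q', 'N', 'N']
  let crntRow := (PySem.List.pyRange 0 8 1).foldl
    (fun (row : List Char) p =>
      row ++ [PySem.List.pyGetD pieceNames (((PySem.List.index? positions p).getD 0 : Nat) : Int) ' ']) []
  String.ofList crntRow

def fixed_pieces (index : Int) : String :=
  if _h : index < 641 then
    let st := ([(4 : Int), 4, 20, 3]).foldl
      (fun (s : List Int × Int) p => (s.1 ++ [PySem.Int.mod s.2 p], PySem.Int.floordiv s.2 p))
      ([], index)
    let hints := st.1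
    fixed_piecesBodyA (PySem.List.pyGetD hints 0 0) (PySem.List.pyGetD hints 1 0)
      (PySem.List.pyGetD hints 2 0) (PySem.List.pyGetD hints 3 0)
  else fixed_pieces 0
termination_by (if index < 641 then 0 else 1)
decreasing_by simp [show ¬ index < 641 by omega]

-- ===== PORT B =====
def pyBinomB (n k : Int) : Int :=
  if k < 0 ∨ n < k then 0
  else (PySem.List.pyRange 0 k 1).foldl (fun r i => PySem.Int.floordiv (r * (n - i)) (i + 1)) 1

-- k-th 3-combination of range(n) by arithmetic unranking; the `if s.2.1 == 0 then s`
-- arm is Python's `break` (once r hits 0 the remaining iterations do nothing)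
def kthCombB (n r k : Int) : List Int :=
  ((PySem.List.pyRange 0 n 1).foldl
    (fun (s : List Int × Int × Int) x =>
      if s.2.1 == 0 then s
      else
        let c := pyBinomB (n - x - 1) (s.2.1 - 1)
        if s.2.2 < c then (s.1 ++ [x], s.2.1 - 1, s.2.2)
        else (s.1, s.2.1, s.2.2 - c))
    ([], r, k)).1

-- body of B's `index < 641` branch; '' is modelled as [] : List Char
def fixed_piecesBodyB (h0 h1 h2 h3 : Int) : String :=
  let board : List (List Char) := List.replicate 8 []
  let board := PySem.List.pySetD board (2 * h0) ['B']
  let board := PySem.List.pySetD board (2 * h1 + 1) ['B']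
  let empties := (PySem.List.pyRange 0 8 1).filter (fun s => PySem.List.pyGetD board s [] == [])
  let rkr := kthCombB 6 3 h2
  let board := (rkr.zip ['R', 'K', 'R']).foldl
    (fun bd pn => PySem.List.pySetD bd (PySem.List.pyGetD empties pn.1 0) [pn.2]) board
  let empties := (PySem.List.pyRange 0 8 1).filter (fun s => PySem.List.pyGetD board s [] == [])
  let board := PySem.List.pySetD board (PySem.List.pyGetD empties h3 0) ['Q']
  let board := (PySem.List.pyRange 0 8 1).foldl
    (fun bd s => if PySem.List.pyGetD bd s [] == [] then PySem.List.pySetD bd s ['N'] else bd) board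
  String.ofList (PySem.Chars.join [] board)

def fixed_pieces_alt (index : Int) : String :=
  if _h : index < 641 then
    let st := ([(4 : Int), 4, 20, 3]).foldl
      (fun (s : List Int × Int) p => (s.1 ++ [PySem.Int.mod s.2 p], PySem.Int.floordiv s.2 p))
      ([], index)
    let hints := st.1
    fixed_piecesBodyB (PySem.List.pyGetD hints 0 0) (PySem.List.pyGetD hints 1 0)
      (PySem.List.pyGetD hints 2 0) (PySem.List.pyGetD hints 3 0)
  else fixed_pieces_alt 0
termination_by (if index < 641 then 0 else 1)
decreasing_by simp [show ¬ index < 641 by omega]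

-- ===== PRECONDITION & SPEC =====
def Spec_fixed_pieces (index : Int) (out : String) : Prop := out = fixed_pieces_alt index
instance (index : Int) (out : String) : Decidable (Spec_fixed_pieces index out) := by unfold Spec_fixed_pieces; infer_instance

-- ===== CLAIM (what is proved, stated in full; the proofs are below) =====
def Claim_equal_fixed_pieces : Prop := ∀ (index : Int), Dom_fixed_pieces index → Spec_fixed_pieces index (fixed_pieces index)

-- ===== LEMMAS AND PROOFS =====

-- the four mixed-radix hints of an index
def pvHints (e : Int) : Int × Int × Int × Int :=
  (PySem.Int.mod e 4, PySem.Int.mod (PySem.Int.floordiv e 4) 4,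
   PySem.Int.mod (PySem.Int.floordiv (PySem.Int.floordiv e 4) 4) 20,
   PySem.Int.mod (PySem.Int.floordiv (PySem.Int.floordiv (PySem.Int.floordiv e 4) 4) 20) 3)

lemma pvHints_bounds (e : Int) :
    0 ≤ (pvHints e).1 ∧ (pvHints e).1 < 4 ∧ 0 ≤ (pvHints e).2.1 ∧ (pvHints e).2.1 < 4 ∧
    0 ≤ (pvHints e).2.2.1 ∧ (pvHints e).2.2.1 < 20 ∧ 0 ≤ (pvHints e).2.2.2 ∧ (pvHints e).2.2.2 < 3 := by
  unfold pvHints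
  exact ⟨PySem.Int.mod_nonneg _ (by norm_num), PySem.Int.mod_lt _ (by norm_num),
         PySem.Int.mod_nonneg _ (by norm_num), PySem.Int.mod_lt _ (by norm_num),
         PySem.Int.mod_nonneg _ (by norm_num), PySem.Int.mod_lt _ (by norm_num),
         PySem.Int.mod_nonneg _ (by norm_num), PySem.Int.mod_lt _ (by norm_num)⟩

-- the two bodies agree on every admissible hint tuple (960 cases, kernel-checked)
set_option maxRecDepth 100000 in
set_option maxHeartbeats 4000000 in
lemma pvBody_eq_fin :
    ∀ (a b : Fin 4) (c : Fin 20) (d : Fin 3),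
      fixed_piecesBodyA a.1 b.1 c.1 d.1 = fixed_piecesBodyB a.1 b.1 c.1 d.1 := by
  decide

lemma pvBody_eq (h0 h1 h2 h3 : Int)
    (H : 0 ≤ h0 ∧ h0 < 4 ∧ 0 ≤ h1 ∧ h1 < 4 ∧ 0 ≤ h2 ∧ h2 < 20 ∧ 0 ≤ h3 ∧ h3 < 3) :
    fixed_piecesBodyA h0 h1 h2 h3 = fixed_piecesBodyB h0 h1 h2 h3 := by
  obtain ⟨p0, q0, p1, q1, p2, q2, p3, q3⟩ := H
  have e0 : h0 = ((h0.toNat : Nat) : Int) := by omega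
  have e1 : h1 = ((h1.toNat : Nat) : Int) := by omega
  have e2 : h2 = ((h2.toNat : Nat) : Int) := by omega
  have e3 : h3 = ((h3.toNat : Nat) : Int) := by omega
  rw [e0, e1, e2, e3]
  exact pvBody_eq_fin ⟨h0.toNat, by omega⟩ ⟨h1.toNat, by omega⟩ ⟨h2.toNat, by omega⟩ ⟨h3.toNat, by omega⟩

-- the hints loop of either port computes exactly pvHints
lemma pvFold_hints (i : Int) :
    (([(4 : Int), 4, 20, 3]).foldl
      (fun (s : List Int × Int) p => (s.1 ++ [PySem.Int.mod s.2 p], PySem.Int.floordiv s.2 p))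
      ([], i)).1
    = [(pvHints i).1, (pvHints i).2.1, (pvHints i).2.2.1, (pvHints i).2.2.2] := rfl

lemma pvCore_eq (i : Int) (h : i < 641) :
    fixed_pieces i = fixed_piecesBodyA (pvHints i).1 (pvHints i).2.1 (pvHints i).2.2.1 (pvHints i).2.2.2 := by
  rw [fixed_pieces]
  simp only [dif_pos h, pvFold_hints]
  rfl

lemma pvCore_alt_eq (i : Int) (h : i < 641) :
    fixed_pieces_alt i = fixed_piecesBodyB (pvHints i).1 (pvHints i).2.1 (pvHints i).2.2.1 (pvHints i).2.2.2 := by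
  rw [fixed_pieces_alt]
  simp only [dif_pos h, pvFold_hints]
  rfl

lemma pvMain (i : Int) : fixed_pieces i = fixed_pieces_alt i := by
  by_cases h : i < 641
  · rw [pvCore_eq i h, pvCore_alt_eq i h]
    exact pvBody_eq _ _ _ _ (pvHints_bounds i)
  · rw [fixed_pieces, dif_neg h, fixed_pieces_alt, dif_neg h]
    rw [pvCore_eq 0 (by norm_num), pvCore_alt_eq 0 (by norm_num)]
    exact pvBody_eq _ _ _ _ (pvHints_bounds 0)

-- ===== VERDICT (by name: the statement is the Claim_ definition above) =====
theorem fixed_pieces_spec : Claim_equal_fixed_pieces := by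
  intro index _
  unfold Spec_fixed_pieces
  exact pvMain index
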